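-- pv_equiv track=rewrite | github.com/Crossroadsman/treehouse-techdegree-python-project1 | league_builder.py | split_players
-- ===== SOURCE A (Python) =====
-- def split_players(players):
--     experienced = []
--     inexperienced = []
--     invalid = []
--
--     for player in players:
--         if player['Soccer Experience'] == 'YES':
--             experienced.append(player)
--         elif player['Soccer Experience'] == 'NO':
--             inexperienced.append(player)
--         else:
--             invalid.append(player)
--
--     return (experienced, inexperienced, invalid)
-- ===== SOURCE B (Python) =====
-- def split_players(players):
--     """Divide-and-conquer partition: recursively split halves and concatenate
--     the per-bucket results (order preserved because concatenation keeps the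
--     left half's players before the right half's)."""
--     n = len(players)
--     if n == 0:
--         return ([], [], [])
--     if n == 1:
--         p = players[0]
--         e = p['Soccer Experience']
--         if e == 'YES':
--             return ([p], [], [])
--         if e == 'NO':
--             return ([], [p], [])
--         return ([], [], [p])
--     mid = n // 2
--     e1, i1, v1 = split_players(players[:mid])
--     e2, i2, v2 = split_players(players[mid:])
--     return (e1 + e2, i1 + i2, v1 + v2)
-- ===== Notes on version B (the rewrite author's own statement) =====
-- stated objective: alternative
-- what changed: Replaces the single left-to-right three-way accumulation loop with a divide-and-conquer recursion: split the list in halves, partition each half recursively, and concatenate the three buckets.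
import Mathlib
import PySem

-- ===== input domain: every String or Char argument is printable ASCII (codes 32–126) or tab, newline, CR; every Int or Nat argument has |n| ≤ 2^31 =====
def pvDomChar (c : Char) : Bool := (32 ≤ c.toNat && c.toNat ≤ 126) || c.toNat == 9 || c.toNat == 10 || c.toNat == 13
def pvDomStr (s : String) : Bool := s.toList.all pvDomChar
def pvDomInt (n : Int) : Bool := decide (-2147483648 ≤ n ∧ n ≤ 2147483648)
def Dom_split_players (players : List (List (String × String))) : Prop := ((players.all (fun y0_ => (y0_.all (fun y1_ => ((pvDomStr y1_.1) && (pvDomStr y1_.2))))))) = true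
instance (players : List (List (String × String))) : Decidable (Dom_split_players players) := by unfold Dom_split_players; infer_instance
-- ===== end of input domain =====

-- B replaces A's single left-to-right three-way accumulation loop with a
-- divide-and-conquer recursion (split in halves, recurse, concatenate buckets);
-- objective: alternative.

-- ===== PORT A =====
-- player['Soccer Experience']; total via getD "" — Pre_ restricts to inputs where the key exists,
-- so the default is never read on admitted inputs.
def pvExp (player : List (String × String)) : String :=
  PySem.Dict.getD (PySem.Dict.mk player) "Soccer Experience" ""

def split_players (players : List (List (String × String))) : (List (List (String × String))) × (List (List (String × String))) × (List (List (String × String))) :=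
  let st := players.foldl
    (fun (acc : List (List (String × String)) × List (List (String × String)) × List (List (String × String))) player =>
      if pvExp player = "YES" then (acc.1 ++ [player], acc.2.1, acc.2.2)
      else if pvExp player = "NO" then (acc.1, acc.2.1 ++ [player], acc.2.2)
      else (acc.1, acc.2.1, acc.2.2 ++ [player]))
    ([], [], [])
  (st.1, st.2.1, st.2.2)

-- ===== PORT B =====
-- players[:mid] / players[mid:] with 0 ≤ mid ≤ n are List.take mid / List.drop mid.
def split_players_alt (players : List (List (String × String))) : (List (List (String × String))) × (List (List (String × String))) × (List (List (String × String))) :=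
  match players with
  | [] => ([], [], [])
  | [p] =>
      if pvExp p = "YES" then ([p], [], [])
      else if pvExp p = "NO" then ([], [p], [])
      else ([], [], [p])
  | a :: b :: rest =>
      let n := (a :: b :: rest).length
      let mid := n / 2
      let l := split_players_alt ((a :: b :: rest).take mid)
      let r := split_players_alt ((a :: b :: rest).drop mid)
      (l.1 ++ r.1, l.2.1 ++ r.2.1, l.2.2 ++ r.2.2)
  termination_by players.length
  decreasing_by
  · simp [List.length_take]; omega
  · simp; omega

-- ===== PRECONDITION & SPEC =====
-- Pre_ excludes exactly the inputs where some player lacks the 'Soccer Experience' key,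
-- on which both Pythons raise KeyError.
def Pre_split_players (players : List (List (String × String))) : Prop :=
  ∀ p ∈ players, ((PySem.Dict.mk p).get? "Soccer Experience").isSome = true
instance (players : List (List (String × String))) : Decidable (Pre_split_players players) := by unfold Pre_split_players; infer_instance

def pvWitness_split_players : (List (List (String × String))) :=
  [[("Name", "A"), ("Soccer Experience", "YES")], [("Soccer Experience", "no way")]]

def Spec_split_players (players : List (List (String × String))) (out : (List (List (String × String))) × (List (List (String × String))) × (List (List (String × String)))) : Prop := out = split_players_alt players
instance (players : List (List (String × String))) (out : (List (List (String × String))) × (List (List (String × String))) × (List (List (String × String)))) : Decidable (Spec_split_players players out) := by unfold Spec_split_players; infer_instance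

-- ===== CLAIM (what is proved, stated in full; the proofs are below) =====
def Claim_equal_split_players : Prop := ∀ (players : List (List (String × String))), Dom_split_players players → Pre_split_players players → Spec_split_players players (split_players players)

-- ===== LEMMAS AND PROOFS =====

-- A's loop invariant: the fold with arbitrary accumulators is the accumulators followed by the filters
theorem split_fold_eq (players : List (List (String × String)))
    (e i v : List (List (String × String))) :
    players.foldl
      (fun (acc : List (List (String × String)) × List (List (String × String)) × List (List (String × String))) player =>
        if pvExp player = "YES" then (acc.1 ++ [player], acc.2.1, acc.2.2)
        else if pvExp player = "NO" then (acc.1, acc.2.1 ++ [player], acc.2.2)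
        else (acc.1, acc.2.1, acc.2.2 ++ [player]))
      (e, i, v)
    = (e ++ players.filter (fun p => pvExp p == "YES"),
       i ++ players.filter (fun p => pvExp p == "NO"),
       v ++ players.filter (fun p => !(pvExp p == "YES") && !(pvExp p == "NO"))) := by
  induction players generalizing e i v with
  | nil => simp
  | cons hd tl ih =>
    by_cases h1 : pvExp hd = "YES"
    · simp [List.foldl_cons, h1, ih]
    · by_cases h2 : pvExp hd = "NO"
      · simp [List.foldl_cons, h2, ih]
      · simp [List.foldl_cons, h1, h2, ih]

-- B's divide-and-conquer also computes the three filters (filter distributes over take ++ drop)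
theorem split_alt_eq (players : List (List (String × String))) :
    split_players_alt players
    = (players.filter (fun p => pvExp p == "YES"),
       players.filter (fun p => pvExp p == "NO"),
       players.filter (fun p => !(pvExp p == "YES") && !(pvExp p == "NO"))) := by
  fun_induction split_players_alt players with
  | case1 => simp [List.filter]
  | case2 p h => simp [h, List.filter]
  | case3 p _ h2 => simp [h2, List.filter]
  | case4 p h1 h2 =>
    have b1 : (pvExp p == "YES") = false := by simp [h1]
    have b2 : (pvExp p == "NO") = false := by simp [h2]
    simp [List.filter, b1, b2]
  | case5 a b rest n mid l r ihT ihD =>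
    have hl : l = split_players_alt ((a :: b :: rest).take mid) := rfl
    have hr : r = split_players_alt ((a :: b :: rest).drop mid) := rfl
    rw [hl, hr, ihT, ihD]
    refine Prod.ext ?_ (Prod.ext ?_ ?_) <;>
      simp [← List.filter_append, List.take_append_drop]

-- ===== VERDICT (by name: the statement is the Claim_ definition above) =====
theorem split_players_spec : Claim_equal_split_players := by
  intro players _ _
  unfold Spec_split_players split_players
  simp [split_fold_eq, split_alt_eq]
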